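-- pv_equiv track=rewrite | github.com/1152024415-crypto/datapallet_dqn | dqn_engine/aod_env_v3.py | _compute_durations
-- ===== SOURCE A (Python) =====
-- from typing import Dict, List, Tuple, Optional, Any
--
-- def _compute_durations(values: List[int]) -> List[int]:
--     """Compute consecutive duration counters for a sequence of values."""
--     durations: List[int] = []
--     prev = None
--     dur = 0
--     for v in values:
--         if prev is None or v != prev:
--             dur = 0
--         else:
--             dur += 1
--         durations.append(dur)
--         prev = v
--     return durations
-- ===== SOURCE B (Python) =====
-- from typing import List
--
-- def _compute_durations(values: List[int]) -> List[int]: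
--     """Run-segmentation: split into maximal runs of equal values, emit 0..len(run)-1 per run."""
--     out: List[int] = []
--     i = 0
--     n = len(values)
--     while i < n:
--         j = i
--         while j < n and values[j] == values[i]:
--             j += 1
--         out.extend(range(j - i))
--         i = j
--     return out
-- ===== Notes on version B (the rewrite author's own statement) =====
-- stated objective: alternative
-- what changed: Replaced the running prev/dur state machine by explicit run segmentation: find each maximal run of equal consecutive values and emit the counter 0..len(run)-1 for it.
import Mathlib
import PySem

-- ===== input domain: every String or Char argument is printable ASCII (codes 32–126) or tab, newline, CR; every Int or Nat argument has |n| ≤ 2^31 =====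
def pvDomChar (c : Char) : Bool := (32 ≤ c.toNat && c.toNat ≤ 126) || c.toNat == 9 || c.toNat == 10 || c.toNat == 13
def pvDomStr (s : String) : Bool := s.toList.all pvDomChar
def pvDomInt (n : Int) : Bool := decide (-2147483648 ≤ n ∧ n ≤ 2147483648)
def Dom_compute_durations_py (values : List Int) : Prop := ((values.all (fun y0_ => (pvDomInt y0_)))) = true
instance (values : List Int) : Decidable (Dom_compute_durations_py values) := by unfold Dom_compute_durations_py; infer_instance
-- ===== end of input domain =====

-- B replaces A's running prev/dur state machine by explicit run segmentation (alternative decomposition, same cost).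

-- ===== PORT A =====
-- loop state: prev (Option, None before the first element) and the current duration counter
def computeDurationsLoopA : List Int → Option Int → Int → List Int
  | [], _, _ => []
  | v :: vs, prev, dur =>
    let d : Int :=
      match prev with
      | none => 0
      | some p => if v ≠ p then 0 else dur + 1
    d :: computeDurationsLoopA vs (some v) d

def compute_durations_py (values : List Int) : List Int :=
  computeDurationsLoopA values none 0

-- ===== PORT B =====
-- run segmentation: take the maximal run of the head value, emit 0..len(run)-1, recurse on the rest
def compute_durations_py_alt (values : List Int) : List Int :=
  match values with
  | [] => []
  | v :: vs =>
    let n := (vs.takeWhile (· == v)).length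
    ((List.range (n + 1)).map (fun k : Nat => (k : Int))) ++ compute_durations_py_alt (vs.dropWhile (· == v))
termination_by values.length
decreasing_by
  simp only [List.length_cons]
  exact Nat.lt_succ_of_le (List.length_dropWhile_le _ _)

-- ===== PRECONDITION & SPEC =====
def Spec_compute_durations_py (values : List Int) (out : List Int) : Prop := out = compute_durations_py_alt values
instance (values : List Int) (out : List Int) : Decidable (Spec_compute_durations_py values out) := by unfold Spec_compute_durations_py; infer_instance

-- ===== CLAIM (what is proved, stated in full; the proofs are below) =====
def Claim_equal_compute_durations_py : Prop := ∀ (values : List Int), Dom_compute_durations_py values → Spec_compute_durations_py values (compute_durations_py values)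

-- ===== LEMMAS AND PROOFS =====

-- after a run has started with value v and counter d, A continues the run exactly as B's
-- per-run counter emission does
theorem loopA_run (vs : List Int) : ∀ (v d : Int),
    computeDurationsLoopA vs (some v) d =
      ((List.range (vs.takeWhile (· == v)).length).map (fun k : Nat => d + 1 + (k : Int)))
        ++ compute_durations_py_alt (vs.dropWhile (· == v)) := by
  induction vs with
  | nil => intro v d; simp [computeDurationsLoopA, compute_durations_py_alt]
  | cons w vs ih =>
    intro v d
    by_cases h : w = v
    · subst h
      simp only [computeDurationsLoopA, List.takeWhile_cons, List.dropWhile_cons,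
        beq_self_eq_true, if_true]
      simp only [ne_eq, not_true_eq_false, if_false, List.length_cons,
        List.range_succ_eq_map, List.map_cons, List.map_map]
      rw [ih w (d + 1)]
      congr 1
      · push_cast; ring_nf
      · simp only [List.append_eq]
        congr 1
        apply List.map_congr_left
        intro k _
        simp only [Function.comp_apply]
        push_cast
        ring
    · have hb : (w == v) = false := by simp [h]
      simp only [computeDurationsLoopA, List.takeWhile_cons, List.dropWhile_cons, hb]
      simp only [ne_eq, h, not_false_eq_true, if_true, Bool.false_eq_true, if_false]
      rw [compute_durations_py_alt.eq_def]
      rw [ih w 0]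
      simp only [List.range_succ_eq_map, List.map_cons, List.map_map]
      congr 1
      rw [List.append_eq]
      congr 1
      apply List.map_congr_left
      intro k _
      simp only [Function.comp_apply]
      push_cast
      ring

theorem loopA_start (values : List Int) :
    computeDurationsLoopA values none 0 = compute_durations_py_alt values := by
  cases values with
  | nil => simp [computeDurationsLoopA, compute_durations_py_alt]
  | cons v vs =>
    simp only [computeDurationsLoopA]
    rw [compute_durations_py_alt.eq_def, loopA_run vs v 0]
    simp only [List.range_succ_eq_map, List.map_cons, List.map_map]
    congr 1
    rw [List.append_eq]
    congr 1
    apply List.map_congr_left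
    intro k _
    simp only [Function.comp_apply]
    push_cast
    ring

-- ===== VERDICT (by name: the statement is the Claim_ definition above) =====
theorem compute_durations_py_spec : Claim_equal_compute_durations_py := by
  intro values _
  unfold Spec_compute_durations_py compute_durations_py
  exact loopA_start values
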